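-- pv_equiv track=rewrite | github.com/siuwhat/weibo | weibo/jieba/filter.py | filter_at
-- ===== SOURCE A (Python) =====
-- def filter_at(string):
--     str = ""
--     flag = True
--     for s in string:
--         if flag:
--             if s!="@":
--                 str=str+s
--             else:
--                 flag=False
--         else:
--             if s==":":
--                 flag=True
--     return str
-- ===== SOURCE B (Python) =====
-- def filter_at(string):
--     head, sep, rest = string.partition('@')
--     if not sep:
--         return string
--     _junk, sep2, tail = rest.partition(':')
--     if not sep2:
--         return head
--     return head + filter_at(tail)
-- ===== Notes on version B (the rewrite author's own statement) =====
-- stated objective: faster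
-- what changed: Replaced the character-by-character loop with a boolean copy/skip flag by a recursive decomposition using str.partition: cut at the first mention marker, cut the remainder at the first colon, keep the prefix and recurse on the tail; the scanning runs in C-level partition instead of a Python-level per-character loop.
import Mathlib
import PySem

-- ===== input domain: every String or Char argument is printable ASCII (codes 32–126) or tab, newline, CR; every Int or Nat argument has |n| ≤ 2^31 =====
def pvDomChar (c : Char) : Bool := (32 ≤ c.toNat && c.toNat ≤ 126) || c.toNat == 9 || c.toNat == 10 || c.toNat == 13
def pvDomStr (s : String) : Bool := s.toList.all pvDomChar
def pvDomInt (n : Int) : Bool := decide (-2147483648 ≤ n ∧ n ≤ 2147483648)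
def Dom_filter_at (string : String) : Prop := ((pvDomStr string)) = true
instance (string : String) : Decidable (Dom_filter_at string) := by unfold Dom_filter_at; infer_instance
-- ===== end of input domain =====

-- B replaces A's flag-driven character loop by a recursive partition-based decomposition (objective: alternative).

-- ===== PORT A =====
-- state: (accumulated output, flag); one step per character, exactly A's branch order
def filterAtStep (p : List Char × Bool) (c : Char) : List Char × Bool :=
  if p.2 then
    (if c ≠ '@' then (p.1 ++ [c], true) else (p.1, false))
  else
    (if c = ':' then (p.1, true) else (p.1, false))

def filter_at (string : String) : String :=
  String.mk (string.toList.foldl filterAtStep ([], true)).1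

-- ===== PORT B =====
-- str.partition(sep) for a single-character sep, ported exactly: scan to the first
-- occurrence of c; (before, found?, after)
def part1 (cs : List Char) (c : Char) : List Char × Bool × List Char :=
  match cs with
  | [] => ([], false, [])
  | x :: t =>
    if x = c then ([], true, t)
    else
      let r := part1 t c
      (x :: r.1, r.2.1, r.2.2)

theorem part1_rest_lt (cs : List Char) (c : Char) (h : (part1 cs c).2.1 = true) :
    (part1 cs c).2.2.length < cs.length := by
  induction cs with
  | nil => simp [part1] at h
  | cons x t ih =>
    by_cases hx : x = c
    · simp [part1, hx]
    · simp only [part1, if_neg hx] at h ⊢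
      exact Nat.lt_succ_of_lt (ih h)

def altGo (cs : List Char) : List Char :=
  match hA : part1 cs '@' with
  | (_, false, _) => cs
  | (head, true, rest) =>
    match hC : part1 rest ':' with
    | (_, false, _) => head
    | (_, true, tail) => head ++ altGo tail
termination_by cs.length
decreasing_by
  have h1 : (part1 cs '@').2.2.length < cs.length :=
    part1_rest_lt cs '@' (by rw [hA])
  have h2 : (part1 rest ':').2.2.length < rest.length :=
    part1_rest_lt rest ':' (by rw [hC])
  rw [hA] at h1; rw [hC] at h2
  simp at h1 h2
  omega

def filter_at_alt (string : String) : String :=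
  String.mk (altGo string.toList)

-- ===== PRECONDITION & SPEC =====
def Spec_filter_at (string : String) (out : String) : Prop := out = filter_at_alt string
instance (string : String) (out : String) : Decidable (Spec_filter_at string out) := by unfold Spec_filter_at; infer_instance

-- ===== CLAIM (what is proved, stated in full; the proofs are below) =====
def Claim_equal_filter_at : Prop := ∀ (string : String), Dom_filter_at string → Spec_filter_at string (filter_at string)

-- ===== LEMMAS AND PROOFS =====

-- A's loop as a two-mode machine over the remaining characters
def machine (flag : Bool) (cs : List Char) : List Char :=
  match cs with
  | [] => []
  | c :: t =>
    if flag then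
      (if c = '@' then machine false t else c :: machine true t)
    else
      (if c = ':' then machine true t else machine false t)

theorem foldl_step_eq_machine (cs : List Char) (acc : List Char) (f : Bool) :
    (cs.foldl filterAtStep (acc, f)).1 = acc ++ machine f cs := by
  induction cs generalizing acc f with
  | nil => simp [machine]
  | cons c t ih =>
    cases f with
    | true =>
      by_cases hc : c = '@' <;>
        simp [List.foldl_cons, filterAtStep, machine, hc, ih]
    | false =>
      by_cases hc : c = ':' <;>
        simp [List.foldl_cons, filterAtStep, machine, hc, ih]

-- part1's result described: either c is absent, or cs splits at its first occurrence
theorem part1_spec (cs : List Char) (c : Char) :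
    ((part1 cs c) = (cs, false, []) ∧ c ∉ cs) ∨
    (∃ h r, cs = h ++ c :: r ∧ c ∉ h ∧ part1 cs c = (h, true, r)) := by
  induction cs with
  | nil => exact Or.inl ⟨rfl, by simp⟩
  | cons x t ih =>
    by_cases hx : x = c
    · exact Or.inr ⟨[], t, by simp [hx], by simp, by simp [part1, hx]⟩
    · rcases ih with ⟨he, hm⟩ | ⟨h, r, ht, hm, he⟩
      · exact Or.inl ⟨by simp [part1, hx, he], by simp [hx, hm, Ne.symm]⟩
      · exact Or.inr ⟨x :: h, r, by simp [ht], by simp [Ne.symm hx, hm], by simp [part1, hx, he]⟩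

theorem machine_true_no_at (cs : List Char) (h : '@' ∉ cs) : machine true cs = cs := by
  induction cs with
  | nil => rfl
  | cons x t ih =>
    simp only [List.mem_cons, not_or] at h
    simp [machine, Ne.symm h.1, ih h.2]

theorem machine_false_no_colon (cs : List Char) (h : ':' ∉ cs) : machine false cs = [] := by
  induction cs with
  | nil => rfl
  | cons x t ih =>
    simp only [List.mem_cons, not_or] at h
    simp [machine, Ne.symm h.1, ih h.2]

theorem machine_true_split (h r : List Char) (hm : '@' ∉ h) :
    machine true (h ++ '@' :: r) = h ++ machine false r := by
  induction h with
  | nil => simp [machine]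
  | cons x t ih =>
    simp only [List.mem_cons, not_or] at hm
    simp [machine, Ne.symm hm.1, ih hm.2]

theorem machine_false_split (h r : List Char) (hm : ':' ∉ h) :
    machine false (h ++ ':' :: r) = machine true r := by
  induction h with
  | nil => simp [machine]
  | cons x t ih =>
    simp only [List.mem_cons, not_or] at hm
    simp [machine, Ne.symm hm.1, ih hm.2]

theorem altGo_no_at (cs f s : List Char) (h : part1 cs '@' = (f, false, s)) :
    altGo cs = cs := by
  rw [altGo]
  split
  · rfl
  · next heq => rw [h] at heq; simp at heq

theorem altGo_no_colon (cs head rest f s : List Char)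
    (h1 : part1 cs '@' = (head, true, rest)) (h2 : part1 rest ':' = (f, false, s)) :
    altGo cs = head := by
  rw [altGo]
  split
  · next heq => rw [h1] at heq; simp at heq
  · next heq =>
      rw [h1] at heq
      simp only [Prod.mk.injEq] at heq
      obtain ⟨rfl, -, rfl⟩ := heq
      split
      · rfl
      · next heq2 => rw [h2] at heq2; simp at heq2

theorem altGo_rec (cs head rest f tail : List Char)
    (h1 : part1 cs '@' = (head, true, rest)) (h2 : part1 rest ':' = (f, true, tail)) :
    altGo cs = head ++ altGo tail := by
  rw [altGo]
  split
  · next heq => rw [h1] at heq; simp at heq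
  · next heq =>
      rw [h1] at heq
      simp only [Prod.mk.injEq] at heq
      obtain ⟨rfl, -, rfl⟩ := heq
      split
      · next heq2 => rw [h2] at heq2; simp at heq2
      · next heq2 =>
          rw [h2] at heq2
          simp only [Prod.mk.injEq] at heq2
          obtain ⟨rfl, -, rfl⟩ := heq2
          rfl

theorem machine_eq_altGo (cs : List Char) : machine true cs = altGo cs := by
  induction cs using altGo.induct with
  | case1 cs w x hA =>
    rcases part1_spec cs '@' with ⟨he, hm⟩ | ⟨h, r, ht, hm, he⟩
    · rw [altGo_no_at cs w x hA, machine_true_no_at cs hm]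
    · rw [hA] at he; cases he
  | case2 cs head rest hA w x hC =>
    rcases part1_spec cs '@' with ⟨he, hm⟩ | ⟨h, r, ht, hm, he⟩
    · rw [hA] at he; cases he
    · rw [hA] at he
      simp only [Prod.mk.injEq] at he
      obtain ⟨rfl, -, rfl⟩ := he
      rcases part1_spec rest ':' with ⟨he2, hm2⟩ | ⟨h2, r2, ht2, hm2, he2⟩
      · rw [altGo_no_colon cs head rest w x hA hC, ht,
            machine_true_split head rest hm, machine_false_no_colon rest hm2]
        simp
      · rw [hC] at he2; cases he2
  | case3 cs head rest hA junk tail hC ih =>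
    rcases part1_spec cs '@' with ⟨he, hm⟩ | ⟨h, r, ht, hm, he⟩
    · rw [hA] at he; cases he
    · rw [hA] at he
      simp only [Prod.mk.injEq] at he
      obtain ⟨rfl, -, rfl⟩ := he
      rcases part1_spec rest ':' with ⟨he2, hm2⟩ | ⟨h2, r2, ht2, hm2, he2⟩
      · rw [hC] at he2; cases he2
      · rw [hC] at he2
        simp only [Prod.mk.injEq] at he2
        obtain ⟨rfl, -, rfl⟩ := he2
        rw [altGo_rec cs head rest junk tail hA hC, ht,
            machine_true_split head rest hm, ht2,
            machine_false_split junk tail hm2, ih]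

-- ===== VERDICT (by name: the statement is the Claim_ definition above) =====
theorem filter_at_spec : Claim_equal_filter_at := by
  intro s _
  unfold Spec_filter_at filter_at filter_at_alt
  rw [foldl_step_eq_machine, machine_eq_altGo]
  simp
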